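-- pv_equiv track=rewrite | github.com/Josblack25/hack_python_2 | hack_6.py | fn_hack_6
-- ===== SOURCE A (Python) =====
-- def fn_hack_6(s):
--     result = s
--     _ls = []
--
--     if not result:
--         return ['0']
--
--     for i in range(len(result)):
--         if (i+1) % 2 !=0:
--             _ls.append(str(i+1))
--         elif (i+1) % 2 == 0:
--             _ls.append('-')
--
--     result = _ls
--     return result
-- ===== SOURCE B (Python) =====
-- def fn_hack_6(s):
--     if not s:
--         return ['0']
--     out = ['-'] * len(s)
--     for i in range(0, len(s), 2):
--         out[i] = str(i + 1)
--     return out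
-- ===== Notes on version B (the rewrite author's own statement) =====
-- stated objective: simpler
-- what changed: Replaces the per-index parity branching loop by pre-filling the whole result with dashes and then overwriting only the odd 1-based positions with a stride-2 loop.
import Mathlib
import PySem

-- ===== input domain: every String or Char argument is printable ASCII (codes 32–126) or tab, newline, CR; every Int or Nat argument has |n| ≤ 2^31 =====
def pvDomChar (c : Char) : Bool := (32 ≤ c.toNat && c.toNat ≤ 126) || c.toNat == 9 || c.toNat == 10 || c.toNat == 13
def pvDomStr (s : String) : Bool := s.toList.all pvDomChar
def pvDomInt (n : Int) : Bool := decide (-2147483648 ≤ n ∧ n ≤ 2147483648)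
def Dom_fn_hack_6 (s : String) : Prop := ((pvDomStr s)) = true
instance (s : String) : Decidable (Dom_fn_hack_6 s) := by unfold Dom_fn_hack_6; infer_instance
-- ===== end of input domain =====

-- B pre-fills the result with dashes and overwrites the odd 1-based positions in a stride-2 loop (same cost, simpler shape).

-- ===== PORT A =====
-- parity-branching loop: for i in range(len(s)): append str(i+1) on odd 1-based position, '-' on even
def fn_hack_6 (s : String) : List String :=
  if s.toList = [] then ["0"]
  else
    (PySem.List.pyRange 0 (PySem.Str.len s) 1).foldl
      (fun ls i =>
        if PySem.Int.mod (i + 1) 2 ≠ 0 then ls ++ [PySem.Int.toStr (i + 1)]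
        else if PySem.Int.mod (i + 1) 2 = 0 then ls ++ ["-"]
        else ls)
      []

-- ===== PORT B =====
-- template of dashes, then out[i] = str(i+1) for i in range(0, len(s), 2);
-- every i the range yields satisfies 0 ≤ i < len(s), so 'i.toNat' and in-bounds List.set are exact for out[i] = …
def fn_hack_6_alt (s : String) : List String :=
  if s.toList = [] then ["0"]
  else
    (PySem.List.pyRange 0 (PySem.Str.len s) 2).foldl
      (fun out i => out.set i.toNat (PySem.Int.toStr (i + 1)))
      (List.replicate s.toList.length "-")

-- ===== PRECONDITION & SPEC =====
def Spec_fn_hack_6 (s : String) (out : List String) : Prop := out = fn_hack_6_alt s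
instance (s : String) (out : List String) : Decidable (Spec_fn_hack_6 s out) := by unfold Spec_fn_hack_6; infer_instance

-- ===== CLAIM (what is proved, stated in full; the proofs are below) =====
def Claim_equal_fn_hack_6 : Prop := ∀ (s : String), Dom_fn_hack_6 s → Spec_fn_hack_6 s (fn_hack_6 s)

-- ===== LEMMAS AND PROOFS =====

-- B's fill loop preserves the length of the accumulator
theorem pv_len_setfold (ks : List Nat) (l : List String) :
    (ks.foldl (fun out k => out.set (2 * k) (PySem.Int.toStr (2 * (k : Int) + 1))) l).length = l.length := by
  induction ks generalizing l with
  | nil => rfl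
  | cons k t ih => simp [List.foldl_cons, ih]

-- element description of B's stride-2 fill over the Nat-indexed range
theorem pv_setfold_getElem? (m : Nat) (l : List String) (j : Nat) :
    (((List.range m).foldl (fun out k => out.set (2 * k) (PySem.Int.toStr (2 * (k : Int) + 1))) l))[j]? =
    if j % 2 = 0 ∧ j < 2 * m ∧ j < l.length then some (PySem.Int.toStr ((j : Int) + 1)) else l[j]? := by
  induction m generalizing j with
  | zero => simp
  | succ m ih =>
    rw [List.range_succ, List.foldl_append]
    simp only [List.foldl_cons, List.foldl_nil]
    rw [List.getElem?_set]
    by_cases hj : 2 * m = j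
    · subst hj
      rw [if_pos rfl, pv_len_setfold]
      by_cases hlt : 2 * m < l.length
      · rw [if_pos hlt, if_pos (by omega : 2 * m % 2 = 0 ∧ 2 * m < 2 * (m + 1) ∧ 2 * m < l.length)]
        push_cast
        ring_nf
      · rw [if_neg hlt, if_neg (by omega : ¬(2 * m % 2 = 0 ∧ 2 * m < 2 * (m + 1) ∧ 2 * m < l.length))]
        exact (List.getElem?_eq_none (by omega)).symm
    · rw [if_neg hj, ih]
      by_cases h1 : j % 2 = 0 ∧ j < 2 * m ∧ j < l.length
      · rw [if_pos h1, if_pos (by omega)]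
      · rw [if_neg h1, if_neg (by omega)]

theorem fn_hack_6_eq_alt (s : String) : fn_hack_6 s = fn_hack_6_alt s := by
  unfold fn_hack_6 fn_hack_6_alt
  by_cases h : s.toList = []
  · simp [h]
  · rw [if_neg h, if_neg h]
    set N := s.toList.length with hN
    have hNpos : 0 < N := by
      cases hs : s.toList with
      | nil => exact absurd hs h
      | cons a t => simp [hN, hs]
    have hlen : PySem.Str.len s = (N : Int) := by simp [PySem.Str.len_eq, hN]
    rw [hlen]
    -- A side: the two-branch step is an unconditional append of one element
    have hstep : (fun (ls : List String) (i : Int) =>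
        if PySem.Int.mod (i + 1) 2 ≠ 0 then ls ++ [PySem.Int.toStr (i + 1)]
        else if PySem.Int.mod (i + 1) 2 = 0 then ls ++ ["-"] else ls)
        = fun ls i => ls ++ [if PySem.Int.mod (i + 1) 2 ≠ 0 then PySem.Int.toStr (i + 1) else "-"] := by
      funext ls i
      by_cases hm : PySem.Int.mod (i + 1) 2 = 0
      · rw [if_neg (not_not_intro hm), if_pos hm, if_neg (not_not_intro hm)]
      · rw [if_pos hm, if_pos hm]
    rw [hstep, PySem.List.foldl_append_singleton_eq_map, List.nil_append]
    -- B side: rewrite the stride-2 range as a map over List.range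
    rw [PySem.List.pyRange_of_pos 0 (N : Int) (by norm_num : (0:Int) < 2)]
    rw [if_pos (by exact_mod_cast hNpos)]
    have hm2 : (((N : Int) - 0 + 2 - 1) / 2).toNat = (N + 1) / 2 := by omega
    rw [hm2, List.foldl_map]
    simp only [zero_add, show ∀ k : Nat, ((2 * (k : Int)).toNat) = 2 * k from fun k => by omega]
    -- compare elementwise
    apply List.ext_getElem?
    intro j
    have hB := pv_setfold_getElem? ((N + 1) / 2) (List.replicate N "-") j
    simp only [List.length_replicate] at hB
    rw [hB]
    rw [PySem.List.pyRange_one]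
    simp only [Int.sub_zero, List.map_map, zero_add]
    have hNt : ((N : Int)).toNat = N := by omega
    rw [hNt]
    have hmod : ∀ j : Nat, PySem.Int.mod ((j : Int) + 1) 2 = (((j + 1) % 2 : Nat) : Int) := by
      intro j
      exact_mod_cast PySem.Int.mod_natCast (j + 1) 2
    by_cases hj : j < N
    · rw [List.getElem?_map, List.getElem?_range hj]
      simp only [Option.map_some, Function.comp_apply]
      by_cases he : j % 2 = 0
      · have hc1 : PySem.Int.mod ((j : Int) + 1) 2 ≠ 0 := by rw [hmod j]; omega
        rw [if_pos hc1, if_pos (⟨he, by omega, hj⟩ : j % 2 = 0 ∧ j < 2 * ((N + 1) / 2) ∧ j < N)]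
      · have hc1 : PySem.Int.mod ((j : Int) + 1) 2 = 0 := by rw [hmod j]; omega
        rw [if_neg (not_not_intro hc1), if_neg (by omega : ¬(j % 2 = 0 ∧ j < 2 * ((N + 1) / 2) ∧ j < N))]
        rw [List.getElem?_replicate, if_pos hj]
    · rw [if_neg (by omega), List.getElem?_replicate, if_neg hj]
      exact List.getElem?_eq_none (by simp; omega)

-- ===== VERDICT (by name: the statement is the Claim_ definition above) =====
theorem fn_hack_6_spec : Claim_equal_fn_hack_6 := by
  intro s _
  unfold Spec_fn_hack_6
  exact fn_hack_6_eq_alt s
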